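-- pv_equiv track=rewrite | github.com/poonsinta96/final_FYP | falcon.py | animation_string_l234
-- ===== SOURCE A (Python) =====
-- def animation_string_l234(animation_str, z3_list):
--     if animation_str.split('/')[0] == 'bear':
--         bb = 0
--     else:
--         bb = 1
--
--     ans2 = ''
--     for stream in z3_list:
--         rule_node = stream[bb]
--         if rule_node != '':
--             x_arr = rule_node.split('/')[1:-2]
--
--             node_x0 = '2-0-' + x_arr[0] + '+' +rule_node
--
--             node_x1 = '2-1-' + x_arr[1]+ '+' +rule_node
--
--             node_x2 = '2-2-' + x_arr[2]+ '+' +rule_node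
--
--             node_x3 = '2-3-' + x_arr[3]+ '+' +rule_node
--
--             ans2 += node_x0 +','+ node_x1 + ','+ node_x2 + ','+ node_x3 +','
--
--     animation_str += ans2[:-1] + '|'
--
--
--     ans3 = ''
--     for stream in z3_list:
--         if stream[bb] != '':
--             ans3 += stream[bb] + ','
--
--     animation_str += ans3[:-1] + '|'
--
--     ans3_4 = ''
--     ans4 = ''
--     ans4_5 = ''
--     for stream in z3_list:
--         rule_node = stream[bb]
--         if rule_node != '':
--             y_node = rule_node.split('/')[-2]
--
--
--             y_label =  '4-0-' + y_node
--             connecter = rule_node + '+' + y_label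
--
--             ans3_4 += connecter + ','
--             ans4 += y_label + ','
--             ans4_5 += y_label+ '+' +'5-0' + ','
--
--     animation_str += ans3_4[:-1] + '|' +ans4[:-1] + '|' +ans4_5[:-1]
--
--     return animation_str
-- ===== SOURCE B (Python) =====
-- def animation_string_l234(animation_str, z3_list):
--     bb = 0 if animation_str.split('/')[0] == 'bear' else 1
--     L1, L2, L3, L4, L5 = [], [], [], [], []
--     for stream in z3_list:
--         rule_node = stream[bb]
--         if rule_node != '':
--             parts = rule_node.split('/')
--             x_arr = parts[1:-2]
--             y_label = '4-0-' + parts[-2]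
--             for i in range(4):
--                 L1.append('2-' + str(i) + '-' + x_arr[i] + '+' + rule_node)
--             L2.append(rule_node)
--             L3.append(rule_node + '+' + y_label)
--             L4.append(y_label)
--             L5.append(y_label + '+5-0')
--     return animation_str + '|'.join(','.join(L) for L in (L1, L2, L3, L4, L5))
-- ===== Notes on version B (the rewrite author's own statement) =====
-- stated objective: simpler
-- what changed: One pass over z3_list collecting five lists (nodes, rule nodes, connecters, labels, label-to-5-0 strings) assembled with ','.join/'|'.join, instead of A's three separate scans building comma-terminated strings trimmed with [:-1].
import Mathlib
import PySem

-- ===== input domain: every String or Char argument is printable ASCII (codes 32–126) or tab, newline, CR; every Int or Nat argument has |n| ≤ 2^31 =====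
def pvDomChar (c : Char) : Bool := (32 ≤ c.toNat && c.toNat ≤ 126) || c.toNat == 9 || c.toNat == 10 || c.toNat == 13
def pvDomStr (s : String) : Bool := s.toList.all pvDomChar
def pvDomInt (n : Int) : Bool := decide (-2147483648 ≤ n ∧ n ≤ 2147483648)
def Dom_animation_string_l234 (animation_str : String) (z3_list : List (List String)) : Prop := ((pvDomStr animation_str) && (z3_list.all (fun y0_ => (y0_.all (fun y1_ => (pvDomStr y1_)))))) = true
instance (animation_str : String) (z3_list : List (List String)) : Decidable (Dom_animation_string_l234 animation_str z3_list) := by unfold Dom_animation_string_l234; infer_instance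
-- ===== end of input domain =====

-- B replaces A's three scans over z3_list and the manual trailing-comma trimming ([:-1]) by a
-- single scan collecting five lists that are then assembled with ','.join / '|'.join.

-- ===== PORT A =====
-- loop bodies of A's three for-loops, named so the foldl lemmas below can speak about them
def aNodesStep (bb : Int) (ans2 : String) (stream : List String) : String :=
  let rule_node := PySem.List.pyGetD stream bb ""
  if rule_node ≠ "" then
    let x_arr := PySem.List.slice ((PySem.Str.split? rule_node "/").getD []) (some 1) (some (-2))
    let node_x0 := "2-0-" ++ PySem.List.pyGetD x_arr 0 "" ++ "+" ++ rule_node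
    let node_x1 := "2-1-" ++ PySem.List.pyGetD x_arr 1 "" ++ "+" ++ rule_node
    let node_x2 := "2-2-" ++ PySem.List.pyGetD x_arr 2 "" ++ "+" ++ rule_node
    let node_x3 := "2-3-" ++ PySem.List.pyGetD x_arr 3 "" ++ "+" ++ rule_node
    ans2 ++ node_x0 ++ "," ++ node_x1 ++ "," ++ node_x2 ++ "," ++ node_x3 ++ ","
  else ans2

def aRulesStep (bb : Int) (ans3 : String) (stream : List String) : String :=
  if PySem.List.pyGetD stream bb "" ≠ "" then ans3 ++ PySem.List.pyGetD stream bb "" ++ "," else ans3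

def aTailStep (bb : Int) (acc : String × String × String) (stream : List String) : String × String × String :=
  let rule_node := PySem.List.pyGetD stream bb ""
  if rule_node ≠ "" then
    let y_node := PySem.List.pyGetD ((PySem.Str.split? rule_node "/").getD []) (-2) ""
    let y_label := "4-0-" ++ y_node
    let connecter := rule_node ++ "+" ++ y_label
    (acc.1 ++ connecter ++ ",", acc.2.1 ++ y_label ++ ",", acc.2.2 ++ y_label ++ "+" ++ "5-0" ++ ",")
  else acc

def animation_string_l234 (animation_str : String) (z3_list : List (List String)) : String :=
  let bb : Int := if PySem.List.pyGetD ((PySem.Str.split? animation_str "/").getD []) 0 "" = "bear" then 0 else 1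
  let ans2 := z3_list.foldl (aNodesStep bb) ""
  let s1 := animation_str ++ PySem.Str.slice ans2 none (some (-1)) ++ "|"
  let ans3 := z3_list.foldl (aRulesStep bb) ""
  let s2 := s1 ++ PySem.Str.slice ans3 none (some (-1)) ++ "|"
  let t := z3_list.foldl (aTailStep bb) ("", "", "")
  s2 ++ PySem.Str.slice t.1 none (some (-1)) ++ "|" ++ PySem.Str.slice t.2.1 none (some (-1)) ++ "|"
     ++ PySem.Str.slice t.2.2 none (some (-1))

-- ===== PORT B =====
-- the single loop body of Source B, collecting the five lists L1..L5
def bStep (bb : Int) (acc : List String × List String × List String × List String × List String)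
    (stream : List String) : List String × List String × List String × List String × List String :=
  let rule_node := PySem.List.pyGetD stream bb ""
  if rule_node ≠ "" then
    let parts := (PySem.Str.split? rule_node "/").getD []
    let x_arr := PySem.List.slice parts (some 1) (some (-2))
    let y_label := "4-0-" ++ PySem.List.pyGetD parts (-2) ""
    ((PySem.List.pyRange 0 4 1).foldl
        (fun l i => l ++ ["2-" ++ PySem.Int.toStr i ++ "-" ++ PySem.List.pyGetD x_arr i "" ++ "+" ++ rule_node]) acc.1,
     acc.2.1 ++ [rule_node],
     acc.2.2.1 ++ [rule_node ++ "+" ++ y_label],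
     acc.2.2.2.1 ++ [y_label],
     acc.2.2.2.2 ++ [y_label ++ "+5-0"])
  else acc

def animation_string_l234_alt (animation_str : String) (z3_list : List (List String)) : String :=
  let bb : Int := if PySem.List.pyGetD ((PySem.Str.split? animation_str "/").getD []) 0 "" = "bear" then 0 else 1
  let acc := z3_list.foldl (bStep bb) ([], [], [], [], [])
  animation_str ++
    PySem.Str.join "|" ([acc.1, acc.2.1, acc.2.2.1, acc.2.2.2.1, acc.2.2.2.2].map (PySem.Str.join ","))

-- ===== PRECONDITION & SPEC =====
-- Pre_ excludes exactly the inputs where the Python A raises IndexError: a stream shorter than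
-- bb+1, or a non-empty rule node whose '/'-split has fewer than 7 parts (so x_arr[3] is missing).
def Pre_animation_string_l234 (animation_str : String) (z3_list : List (List String)) : Prop :=
  let bb : Int := if PySem.List.pyGetD ((PySem.Str.split? animation_str "/").getD []) 0 "" = "bear" then 0 else 1
  ∀ stream ∈ z3_list, bb < (stream.length : Int) ∧
    (PySem.List.pyGetD stream bb "" ≠ "" →
      7 ≤ ((PySem.Str.split? (PySem.List.pyGetD stream bb "") "/").getD []).length)
instance (animation_str : String) (z3_list : List (List String)) : Decidable (Pre_animation_string_l234 animation_str z3_list) := by unfold Pre_animation_string_l234; infer_instance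

def pvWitness_animation_string_l234 : String × List (List String) :=
  ("bear", [["a/b/c/d/e/f/g"], [""]])

def Spec_animation_string_l234 (animation_str : String) (z3_list : List (List String)) (out : String) : Prop := out = animation_string_l234_alt animation_str z3_list
instance (animation_str : String) (z3_list : List (List String)) (out : String) : Decidable (Spec_animation_string_l234 animation_str z3_list out) := by unfold Spec_animation_string_l234; infer_instance

-- ===== CLAIM (what is proved, stated in full; the proofs are below) =====
def Claim_equal_animation_string_l234 : Prop := ∀ (animation_str : String) (z3_list : List (List String)), Dom_animation_string_l234 animation_str z3_list → Pre_animation_string_l234 animation_str z3_list → Spec_animation_string_l234 animation_str z3_list (animation_string_l234 animation_str z3_list)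

-- ===== LEMMAS AND PROOFS =====

-- the rule nodes selected by both programs, and the strings built from one rule node
def pvItems (bb : Int) (l : List (List String)) : List String :=
  l.filterMap (fun stream =>
    let r := PySem.List.pyGetD stream bb ""
    if r = "" then none else some r)

def pvParts (r : String) : List String := (PySem.Str.split? r "/").getD []

def pvN (i : Int) (r : String) : String :=
  "2-" ++ PySem.Int.toStr i ++ "-" ++
    PySem.List.pyGetD (PySem.List.slice (pvParts r) (some 1) (some (-2))) i "" ++ "+" ++ r

def pvYlab (r : String) : String := "4-0-" ++ PySem.List.pyGetD (pvParts r) (-2) ""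

def pvNodes (bb : Int) (l : List (List String)) : List String :=
  (pvItems bb l).flatMap (fun r => [pvN 0 r, pvN 1 r, pvN 2 r, pvN 3 r])

-- comma-terminated concatenation, at the character level
def pvCat (L : List String) : List Char := (L.map (fun s => s.toList ++ [','])).flatten

lemma pvCat_dropLast (L : List String) :
    (pvCat L).dropLast = PySem.Chars.join [','] (L.map String.toList) := by
  induction L with
  | nil => simp [pvCat, PySem.Chars.join_nil]
  | cons a L ih =>
    cases L with
    | nil => simp [pvCat, PySem.Chars.join_singleton]
    | cons b M =>
      have h : pvCat (b :: M) ≠ [] := by simp [pvCat]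
      have e : pvCat (a :: b :: M) = (a.toList ++ [',']) ++ pvCat (b :: M) := by
        simp [pvCat]
      rw [e, List.dropLast_append_of_ne_nil h, ih]
      simp [PySem.Chars.join_cons_cons]

lemma loopA2 (bb : Int) (l : List (List String)) : ∀ a : String,
    (l.foldl (aNodesStep bb) a).toList = a.toList ++ pvCat (pvNodes bb l) := by
  induction l with
  | nil => intro a; simp [pvNodes, pvItems, pvCat]
  | cons stream l ih =>
    intro a
    by_cases h : PySem.List.pyGetD stream bb "" = ""
    · simp [List.foldl, aNodesStep, h, ih, pvNodes, pvItems]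
    · simp only [List.foldl, aNodesStep, h, ne_eq, not_false_iff, if_pos, ih]
      have hn : pvNodes bb (stream :: l)
          = [pvN 0 (PySem.List.pyGetD stream bb ""), pvN 1 (PySem.List.pyGetD stream bb ""),
             pvN 2 (PySem.List.pyGetD stream bb ""), pvN 3 (PySem.List.pyGetD stream bb "")]
            ++ pvNodes bb l := by
        simp [pvNodes, pvItems, h]
      rw [hn]
      have t0 : PySem.Int.toChars 0 = ['0'] := by decide
      have t1 : PySem.Int.toChars 1 = ['1'] := by decide
      have t2 : PySem.Int.toChars 2 = ['2'] := by decide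
      have t3 : PySem.Int.toChars 3 = ['3'] := by decide
      simp [pvCat, pvN, pvParts, t0, t1, t2, t3]

lemma loopA3 (bb : Int) (l : List (List String)) : ∀ a : String,
    (l.foldl (aRulesStep bb) a).toList = a.toList ++ pvCat (pvItems bb l) := by
  induction l with
  | nil => intro a; simp [pvItems, pvCat]
  | cons stream l ih =>
    intro a
    by_cases h : PySem.List.pyGetD stream bb "" = ""
    · simp [List.foldl, aRulesStep, h, ih, pvItems]
    · simp [List.foldl, aRulesStep, h, ih, pvItems, pvCat]

lemma loopA4 (bb : Int) (l : List (List String)) : ∀ t : String × String × String,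
    (l.foldl (aTailStep bb) t).1.toList
        = t.1.toList ++ pvCat ((pvItems bb l).map (fun r => r ++ "+" ++ pvYlab r)) ∧
    (l.foldl (aTailStep bb) t).2.1.toList
        = t.2.1.toList ++ pvCat ((pvItems bb l).map pvYlab) ∧
    (l.foldl (aTailStep bb) t).2.2.toList
        = t.2.2.toList ++ pvCat ((pvItems bb l).map (fun r => pvYlab r ++ "+5-0")) := by
  induction l with
  | nil => intro t; simp [pvItems, pvCat]
  | cons stream l ih =>
    intro t
    by_cases h : PySem.List.pyGetD stream bb "" = ""
    · simpa [List.foldl, aTailStep, h, pvItems] using ih t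
    · obtain ⟨i1, i2, i3⟩ := ih (aTailStep bb t stream)
      simp only [List.foldl]
      refine ⟨?_, ?_, ?_⟩
      · rw [i1]; simp [aTailStep, h, pvItems, pvCat, pvYlab, pvParts]
      · rw [i2]; simp [aTailStep, h, pvItems, pvCat, pvYlab, pvParts]
      · rw [i3]; simp [aTailStep, h, pvItems, pvCat, pvYlab, pvParts]

lemma loopB (bb : Int) (l : List (List String)) :
    ∀ acc : List String × List String × List String × List String × List String,
    l.foldl (bStep bb) acc
      = (acc.1 ++ pvNodes bb l,
         acc.2.1 ++ pvItems bb l,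
         acc.2.2.1 ++ (pvItems bb l).map (fun r => r ++ "+" ++ pvYlab r),
         acc.2.2.2.1 ++ (pvItems bb l).map pvYlab,
         acc.2.2.2.2 ++ (pvItems bb l).map (fun r => pvYlab r ++ "+5-0")) := by
  induction l with
  | nil => intro acc; simp [pvNodes, pvItems]
  | cons stream l ih =>
    intro acc
    by_cases h : PySem.List.pyGetD stream bb "" = ""
    · simp [List.foldl, bStep, h, ih, pvNodes, pvItems]
    · have hr : PySem.List.pyRange 0 4 1 = [0, 1, 2, 3] := by decide
      simp only [List.foldl, bStep, h, ne_eq, not_false_iff, if_true, ih, hr]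
      have hn : pvNodes bb (stream :: l)
          = [pvN 0 (PySem.List.pyGetD stream bb ""), pvN 1 (PySem.List.pyGetD stream bb ""),
             pvN 2 (PySem.List.pyGetD stream bb ""), pvN 3 (PySem.List.pyGetD stream bb "")]
            ++ pvNodes bb l := by
        simp [pvNodes, pvItems, h]
      simp [hn, pvItems, h, pvN, pvYlab, pvParts]

-- ===== VERDICT (by name: the statement is the Claim_ definition above) =====
theorem animation_string_l234_spec : Claim_equal_animation_string_l234 := by
  intro animation_str z3_list _ _
  unfold Spec_animation_string_l234 animation_string_l234 animation_string_l234_alt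
  apply String.toList_inj.mp
  generalize (if PySem.List.pyGetD ((PySem.Str.split? animation_str "/").getD []) 0 "" = "bear"
      then (0 : Int) else 1) = bb
  have h2 := loopA2 bb z3_list ""
  have h3 := loopA3 bb z3_list ""
  have h4 := loopA4 bb z3_list ("", "", "")
  have hb := loopB bb z3_list ([], [], [], [], [])
  simp [hb, h2, h3, h4.1, h4.2.1, h4.2.2,
    PySem.Str.toList_join, pvCat_dropLast, PySem.List.slice_to_neg_one,
    PySem.Chars.join_cons_cons, PySem.Chars.join_singleton]
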